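-- pv_equiv track=rewrite | github.com/miliar/Code_Jam_Webscraper | solutions_python/Problem_55/154.py | rideMax
-- ===== SOURCE A (Python) =====
-- def rideMax(start, k, people, n):
--     c = 0
--     s = start
--     over = False;
--     while (c < k and not over):
--         if((c + people[s]) <= k):
--             c += people[s]
--             s = s + 1
--             if s == n:
--                 s = 0
--         else:
--             over = True
--         if (s == start):
--            over = True
--     return c, s
-- ===== SOURCE B (Python) =====
-- def rideMax(start, k, people, n):
--     rot = people[start:] + people[:start]
--     pref = [0]
--     for x in rot:
--         pref.append(pref[-1] + x)
--     m = len(rot)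
--     t = next((i for i in range(m) if pref[i] >= k or pref[i + 1] > k), m)
--     return (pref[t], (start + t) % n) if t else (0, start)
-- ===== Notes on version B (the rewrite author's own statement) =====
-- stated objective: alternative
-- what changed: B precomputes the full prefix-sum table of the rotated list in one staged pass, then locates the stopping point as the first prefix index violating the capacity condition and reads both outputs (pref[t] and (start+t)%n) off the table, instead of A's modular-index walk with a running accumulator and an over flag.
-- outside the precondition, e.g. on rideMax(0, 20, [1, 2, 9], 2): A returns (3, 0), B returns (12, 1); on rideMax(1, 5, [1, 2, 9], 2): A returns (3, 1), B returns (2, 0)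
import Mathlib
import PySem

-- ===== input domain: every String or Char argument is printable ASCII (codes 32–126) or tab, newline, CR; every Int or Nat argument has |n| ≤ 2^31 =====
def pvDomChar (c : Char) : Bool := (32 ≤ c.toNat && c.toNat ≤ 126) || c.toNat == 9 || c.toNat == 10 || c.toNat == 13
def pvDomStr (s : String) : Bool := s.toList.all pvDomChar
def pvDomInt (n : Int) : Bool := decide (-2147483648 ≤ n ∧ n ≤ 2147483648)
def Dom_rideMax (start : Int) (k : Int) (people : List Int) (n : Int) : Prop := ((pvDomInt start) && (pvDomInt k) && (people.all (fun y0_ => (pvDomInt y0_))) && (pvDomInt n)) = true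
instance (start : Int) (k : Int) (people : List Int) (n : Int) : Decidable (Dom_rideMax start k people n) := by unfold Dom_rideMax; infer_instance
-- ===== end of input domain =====

-- B replaces A's modular-index while-loop (with 'over' flag) by a staged computation:
-- build the prefix-sum table of the rotated list, find the first violating index t,
-- and read the result off the table: (pref[t], (start+t) % n).

-- ===== PORT A =====
-- the while loop, fueled (fuel only makes the recursion total; within Pre_ it never runs out)
def rideMaxLoop (k : Int) (people : List Int) (n start : Int) : Nat → Int → Int → Bool → Int × Int
  | 0, c, s, _ => (c, s)
  | f + 1, c, s, ov0 =>
    if c < k ∧ ov0 = false then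
      match PySem.List.pyGet? people s with
      | none => (c, s)   -- IndexError; outside Pre_
      | some p =>
        if c + p ≤ k then
          let s1 := s + 1
          let s2 := if s1 = n then 0 else s1
          rideMaxLoop k people n start f (c + p) s2 (if s2 = start then true else ov0)
        else
          let ov := true
          rideMaxLoop k people n start f c s (if s = start then true else ov)
    else (c, s)

def rideMax (start : Int) (k : Int) (people : List Int) (n : Int) : Int × Int :=
  rideMaxLoop k people n start (n.toNat + 1) 0 start false

-- ===== PORT B =====
-- the prefix-sum table: prefFrom c l = [c, c+l0, c+l0+l1, …] (the Python loop appending pref[-1]+x)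
def prefFrom (c : Int) : List Int → List Int
  | [] => [c]
  | x :: xs => c :: prefFrom (c + x) xs

-- first index t with pref[t] ≥ k or pref[t+1] > k, else the number of pairs (the 'next(…, m)')
def findT (k : Int) : List Int → Nat
  | a :: b :: rest => if a ≥ k ∨ b > k then 0 else findT k (b :: rest) + 1
  | _ => 0

def rideMax_alt (start : Int) (k : Int) (people : List Int) (n : Int) : Int × Int :=
  let rot := PySem.List.slice people (some start) none ++ PySem.List.slice people none (some start)
  let pref := prefFrom 0 rot
  let t := findT k pref
  if t = 0 then (0, start)
  else (PySem.List.pyGetD pref (t : Int) 0, PySem.Int.mod (start + (t : Int)) n)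

-- ===== PRECONDITION & SPEC =====
-- Pre_ admits the function's natural domain (n = len(people), 0 ≤ start < n) plus every input
-- on which A stops before boarding any group (k ≤ 0, or a valid start whose first group exceeds k).
-- Excluded are inputs outside the natural domain on which A still returns by cycling over only a
-- prefix people[0:n] of the list or through negative-index wraparound — accidents of A's indexing —
-- and the inputs where A raises IndexError or loops forever.
def Pre_rideMax (start : Int) (k : Int) (people : List Int) (n : Int) : Prop :=
  (n = (people.length : Int) ∧ 0 ≤ start ∧ start < n) ∨
  k ≤ 0 ∨
  (0 < k ∧ PySem.Raise.InRange people.length start ∧ k < PySem.List.pyGetD people start 0)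
instance (start : Int) (k : Int) (people : List Int) (n : Int) : Decidable (Pre_rideMax start k people n) := by unfold Pre_rideMax; infer_instance

def pvWitness_rideMax : Int × Int × List Int × Int := (1, 6, [2, 3, 4], 3)

def Spec_rideMax (start : Int) (k : Int) (people : List Int) (n : Int) (out : Int × Int) : Prop := out = rideMax_alt start k people n
instance (start : Int) (k : Int) (people : List Int) (n : Int) (out : Int × Int) : Decidable (Spec_rideMax start k people n out) := by unfold Spec_rideMax; infer_instance

-- ===== CLAIM (what is proved, stated in full; the proofs are below) =====
def Claim_equal_rideMax : Prop := ∀ (start : Int) (k : Int) (people : List Int) (n : Int), Dom_rideMax start k people n → Pre_rideMax start k people n → Spec_rideMax start k people n (rideMax start k people n)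

-- ===== LEMMAS AND PROOFS =====

-- proof-side greedy scan: bridge between A's loop and B's table lookup
def scanB (k : Int) : List Int → Int → Int → Int × Int
  | [], c, t => (c, t)
  | x :: xs, c, t => if c ≥ k ∨ c + x > k then (c, t) else scanB k xs (c + x) (t + 1)

lemma prefFrom_head (c : Int) (l : List Int) : ∃ rest, prefFrom c l = c :: rest := by
  cases l <;> exact ⟨_, rfl⟩

lemma scan_eq_table (k : Int) : ∀ (l : List Int) (c t : Int),
    scanB k l c t
      = ((prefFrom c l).getD (findT k (prefFrom c l)) 0,
         t + (findT k (prefFrom c l) : Int)) := by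
  intro l
  induction l with
  | nil => intro c t; simp [scanB, prefFrom, findT]
  | cons x xs ih =>
    intro c t
    obtain ⟨rest, hr⟩ := prefFrom_head (c + x) xs
    rw [show prefFrom c (x :: xs) = c :: prefFrom (c + x) xs from rfl, hr]
    rw [scanB, findT]
    by_cases h : c ≥ k ∨ c + x > k
    · rw [if_pos h, if_pos h]
      simp
    · rw [if_neg h, if_neg h, ih (c + x) (t + 1), ← hr]
      rw [Prod.mk.injEq]
      refine ⟨by simp, by push_cast; ring⟩

lemma alt_eq (start k : Int) (people : List Int) (n : Int) :
    rideMax_alt start k people n =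
      (let r := scanB k (PySem.List.slice people (some start) none ++
                          PySem.List.slice people none (some start)) 0 0
       if r.2 = 0 then ((0 : Int), start) else (r.1, PySem.Int.mod (start + r.2) n)) := by
  simp only [rideMax_alt]
  rw [scan_eq_table]
  simp only [Int.zero_add, Nat.cast_eq_zero, PySem.List.pyGetD_natCast]

lemma mod_sub_of_lt_two (x N : Nat) (h1 : N ≤ x) (h2 : x < 2 * N) : x % N = x - N := by
  rw [Nat.mod_eq_sub_mod h1]
  exact Nat.mod_eq_of_lt (by omega)

lemma mod_step (x N : Nat) (hN : 0 < N) :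
    (x + 1) % N = if x % N + 1 = N then 0 else x % N + 1 := by
  have hx : x % N + N * (x / N) = x := Nat.mod_add_div x N
  have key : (x + 1) % N = (x % N + 1) % N := by
    conv_lhs => rw [← hx]
    rw [show x % N + N * (x / N) + 1 = x % N + 1 + N * (x / N) by ring]
    exact Nat.add_mul_mod_self_left _ _ _
  have hlt : x % N < N := Nat.mod_lt x hN
  by_cases hc : x % N + 1 = N
  · simp [hc, key]
  · rw [key, if_neg hc]
    exact Nat.mod_eq_of_lt (by omega)

lemma mod_eq_iff_full (a t N : Nat) (ha : a < N) (ht : 0 < t) (ht2 : t ≤ N) :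
    (a + t) % N = a ↔ t = N := by
  constructor
  · intro h
    rcases Nat.lt_or_ge (a + t) N with hlt | hge
    · rw [Nat.mod_eq_of_lt hlt] at h; omega
    · rw [mod_sub_of_lt_two _ _ hge (by omega)] at h; omega
  · intro h
    subst h
    rw [Nat.add_mod_right]
    exact Nat.mod_eq_of_lt ha

lemma rot_get (people : List Int) (a N t : Nat) (hN : people.length = N) (ha : a < N) (ht : t < N) :
    PySem.List.pyGet? people (((a + t) % N : Nat) : Int)
      = (people.drop a ++ people.take a)[t]? := by
  rw [PySem.List.pyGet?_natCast]
  have hda : (people.drop a).length = N - a := by simp [hN]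
  rcases Nat.lt_or_ge t (N - a) with hlt | hge
  · rw [List.getElem?_append_left (by omega)]
    rw [List.getElem?_drop]
    congr 1
    exact Nat.mod_eq_of_lt (by omega)
  · rw [List.getElem?_append_right (by omega)]
    rw [hda]
    have hj : t - (N - a) < a := by omega
    rw [List.getElem?_take_of_lt hj]
    congr 1
    rw [mod_sub_of_lt_two _ _ (by omega) (by omega)]
    omega

lemma loop_over (k : Int) (people : List Int) (n start : Int) (f : Nat) (c s : Int) :
    rideMaxLoop k people n start f c s true = (c, s) := by
  cases f <;> simp [rideMaxLoop]

lemma loop_succ (k : Int) (people : List Int) (n start : Int) (f : Nat) (c s : Int) :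
    rideMaxLoop k people n start (f + 1) c s false =
      if c < k then
        match PySem.List.pyGet? people s with
        | none => (c, s)
        | some p =>
          if c + p ≤ k then
            rideMaxLoop k people n start f (c + p) (if s + 1 = n then 0 else s + 1)
              (if (if s + 1 = n then 0 else s + 1) = start then true else false)
          else rideMaxLoop k people n start f c s true
      else (c, s) := by
  rw [rideMaxLoop]
  by_cases hck : c < k
  · rw [if_pos (by exact ⟨hck, rfl⟩), if_pos hck]
    cases PySem.List.pyGet? people s with
    | none => rfl
    | some p => simp only [ite_self]
  · rw [if_neg (by intro h; exact hck h.1), if_neg hck]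

lemma key_lemma (k : Int) (people : List Int) (a N : Nat) (hN : people.length = N) (ha : a < N) :
    ∀ (l : List Int) (t : Nat) (c : Int) (f : Nat),
      t + l.length = N → t < N → l = (people.drop a ++ people.take a).drop t →
      l.length + 1 ≤ f →
      ∃ (c' : Int) (u : Nat), u ≤ l.length ∧
        scanB k l c (t : Int) = (c', ((t + u : Nat) : Int)) ∧
        rideMaxLoop k people (N : Int) (a : Int) f c (((a + t) % N : Nat) : Int) false
          = (c', (((a + t + u) % N : Nat) : Int)) := by
  intro l
  induction l with
  | nil => intro t c f hlen ht _ _; exfalso; simp at hlen; omega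
  | cons x l' ih =>
    intro t c f hlen ht hdrop hf
    have hx : (people.drop a ++ people.take a)[t]? = some x := by
      have h0 : ((people.drop a ++ people.take a).drop t)[0]? = some x := by
        rw [← hdrop]; rfl
      rwa [List.getElem?_drop, Nat.add_zero] at h0
    obtain ⟨f', rfl⟩ : ∃ f', f = f' + 1 := ⟨f - 1, by omega⟩
    by_cases hck : c < k
    · have hget := rot_get people a N t hN ha ht
      rw [hx] at hget
      by_cases hfit : c + x ≤ k
      · -- both take the element
        have hscan : scanB k (x :: l') c (t : Int) = scanB k l' (c + x) (((t + 1 : Nat)) : Int) := by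
          rw [scanB]
          rw [if_neg (by omega)]
          norm_cast
        have hNpos : 0 < N := by omega
        have hm : (a + t) % N < N := Nat.mod_lt _ hNpos
        have hs2 : (if (((a + t) % N : Nat) : Int) + 1 = (N : Int) then (0 : Int)
              else (((a + t) % N : Nat) : Int) + 1) = (((a + t + 1) % N : Nat) : Int) := by
          rw [mod_step (a + t) N hNpos]
          by_cases hc : (a + t) % N + 1 = N
          · rw [if_pos hc, if_pos (show (((a + t) % N : Nat) : Int) + 1 = (N : Int) by
              exact_mod_cast congrArg (Nat.cast (R := Int)) hc)]
            exact (Nat.cast_zero).symm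
          · rw [if_neg hc, if_neg (show ¬ ((((a + t) % N : Nat) : Int) + 1 = (N : Int)) by
              intro h; exact hc (by exact_mod_cast h))]
            push_cast; ring
        rw [show rideMaxLoop k people (N : Int) (a : Int) (f' + 1) c (((a + t) % N : Nat) : Int) false
              = rideMaxLoop k people (N : Int) (a : Int) f' (c + x)
                  (((a + t + 1) % N : Nat) : Int)
                  (if (((a + t + 1) % N : Nat) : Int) = (a : Int) then true else false) by
          rw [loop_succ, if_pos hck, hget]
          simp only [if_pos hfit, hs2]]
        rcases eq_or_ne l' [] with rfl | hl'
        · -- last element: t + 1 = N, the loop sets over and stops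
          have htN : t + 1 = N := by simpa using hlen
          have hmod : (a + t + 1) % N = a := by
            rw [show a + t + 1 = a + N by omega, Nat.add_mod_right]
            exact Nat.mod_eq_of_lt ha
          rw [hmod, if_pos rfl, loop_over]
          refine ⟨c + x, 1, by simp, ?_, ?_⟩
          · rw [hscan]; rfl
          · rw [hmod]
        · -- not the last element: over stays false, apply the IH
          have hlen' : 0 < l'.length := List.length_pos_iff.mpr hl'
          have ht1 : t + 1 < N := by simp at hlen; omega
          have hmodne : (a + t + 1) % N ≠ a := by
            rw [show a + t + 1 = a + (t + 1) by ring]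
            intro h
            have := (mod_eq_iff_full a (t + 1) N ha (by omega) (by omega)).mp h
            omega
          rw [if_neg (by intro h; apply hmodne; exact_mod_cast h)]
          have hdrop' : l' = (people.drop a ++ people.take a).drop (t + 1) := by
            have hdt : (people.drop a ++ people.take a).drop (t + 1)
                = ((people.drop a ++ people.take a).drop t).tail := by
              rw [← List.tail_drop]
            rw [hdt, ← hdrop]; rfl
          obtain ⟨c', u', hu', hsc, hlp⟩ :=
            ih (t + 1) (c + x) f' (by simp at hlen ⊢; omega) ht1 hdrop' (by simp at hf ⊢; omega)
          refine ⟨c', u' + 1, by simp; omega, ?_, ?_⟩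
          · rw [hscan, hsc]
            congr 2
            omega
          · rw [show a + t + (u' + 1) = a + t + 1 + u' by omega]
            exact hlp
      · -- element does not fit: both stop
        refine ⟨c, 0, by simp, ?_, ?_⟩
        · rw [scanB, if_pos (by right; omega)]; simp
        · rw [loop_succ, if_pos hck, hget]
          simp only [if_neg hfit, loop_over]
          simp
    · -- c ≥ k: both stop immediately
      refine ⟨c, 0, by simp, ?_, ?_⟩
      · rw [scanB, if_pos (by left; omega)]; simp
      · rw [loop_succ, if_neg hck]
        simp

lemma scan_ge (k : Int) : ∀ (l : List Int) (c t : Int), t ≤ (scanB k l c t).2 := by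
  intro l
  induction l with
  | nil => intro c t; simp [scanB]
  | cons x xs ih =>
    intro c t
    rw [scanB]
    split_ifs with h
    · simp
    · exact le_trans (by omega) (ih (c + x) (t + 1))

lemma scan_first (k : Int) (l : List Int) (c t : Int) (h : (scanB k l c t).2 = t) :
    (scanB k l c t).1 = c := by
  cases l with
  | nil => rfl
  | cons x xs =>
    rw [scanB] at h ⊢
    split_ifs at h ⊢ with hc
    · rfl
    · exfalso
      have := scan_ge k xs (c + x) (t + 1)
      omega

lemma head_rot (people : List Int) (start : Int) (h : PySem.Raise.InRange people.length start) :
    ∃ x rest, PySem.List.pyGet? people start = some x ∧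
      PySem.List.slice people (some start) none ++ PySem.List.slice people none (some start)
        = x :: rest := by
  have hb : -(people.length : Int) ≤ start ∧ start < (people.length : Int) := by
    simpa [PySem.Raise.InRange] using h
  by_cases hs : 0 ≤ start
  · obtain ⟨a, rfl⟩ : ∃ a : Nat, start = (a : Int) := ⟨start.toNat, (Int.toNat_of_nonneg hs).symm⟩
    have ha : a < people.length := by exact_mod_cast hb.2
    refine ⟨people[a], people.drop (a + 1) ++ people.take a, ?_, ?_⟩
    · rw [PySem.List.pyGet?_natCast, List.getElem?_eq_getElem ha]
    · rw [PySem.List.slice_from_natCast, PySem.List.slice_to_natCast,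
        ← List.cons_append, List.getElem_cons_drop]
  · obtain ⟨b, hb0, rfl⟩ : ∃ b : Nat, 0 < b ∧ start = -(b : Int) := by
      refine ⟨(-start).toNat, by omega, by omega⟩
    have hbL : b ≤ people.length := by
      have h1 := hb.1
      omega
    have hlt : people.length - b < people.length := by omega
    refine ⟨people[people.length - b],
      people.drop (people.length - b + 1) ++ people.take (people.length - b), ?_, ?_⟩
    · rw [PySem.List.pyGet?_neg_natCast _ _ hb0 hbL, List.getElem?_eq_getElem hlt]
    · rw [PySem.List.slice_from_neg_natCast _ _ hb0, PySem.List.slice_to_neg_natCast _ _ hb0,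
        ← List.cons_append, List.getElem_cons_drop]

-- ===== VERDICT (by name: the statement is the Claim_ definition above) =====
theorem rideMax_spec : Claim_equal_rideMax := by
  intro start k people n _ hpre
  show rideMax start k people n = rideMax_alt start k people n
  rw [alt_eq]
  simp only []
  rcases hpre with ⟨hn, hs0, hsn⟩ | hk | ⟨hk, hrange, hbig⟩
  · -- natural domain: n = len(people), 0 ≤ start < n
    set N := people.length with hNdef
    set a := start.toNat with hadef
    have hstart : start = (a : Int) := (Int.toNat_of_nonneg hs0).symm
    have haN : a < N := by omega
    have hrotlen : ((people.drop a ++ people.take a)).length = N := by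
      simp; omega
    obtain ⟨c', u, hu, hsc, hlp⟩ :=
      key_lemma k people a N rfl haN (people.drop a ++ people.take a) 0 0 (N + 1)
        (by simpa using hrotlen) (by omega) (by simp) (by omega)
    simp only [Nat.cast_zero, Nat.zero_add] at hsc
    simp only [Nat.add_zero] at hlp
    rw [Nat.mod_eq_of_lt haN] at hlp
    have hrot : PySem.List.slice people (some start) none ++ PySem.List.slice people none (some start)
        = people.drop a ++ people.take a := by
      rw [hstart, PySem.List.slice_from_natCast, PySem.List.slice_to_natCast]
    have hfuel : n.toNat + 1 = N + 1 := by omega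
    have hA : rideMax start k people n = (c', (((a + u) % N : Nat) : Int)) := by
      unfold rideMax
      rw [hfuel, hn, hstart]
      exact hlp
    rw [hA, hrot, hsc]
    show _ = if ((u : Nat) : Int) = 0 then ((0 : Int), start)
             else (c', PySem.Int.mod (start + ((u : Nat) : Int)) n)
    by_cases hu0 : u = 0
    · subst hu0
      rw [if_pos (by simp)]
      have hc0 : c' = 0 := by
        have h2 : (scanB k (people.drop a ++ people.take a) 0 0).2 = 0 := by
          rw [hsc]; simp
        have h1 := scan_first k (people.drop a ++ people.take a) 0 0 h2
        rw [hsc] at h1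
        exact h1
      rw [hc0, Nat.add_zero, Nat.mod_eq_of_lt haN, ← hstart]
    · rw [if_neg (by exact_mod_cast hu0)]
      rw [hn, hstart]
      rw [show ((a : Int)) + ((u : Nat) : Int) = (((a + u : Nat)) : Int) by push_cast; ring]
      rw [PySem.Int.mod_natCast]
  · -- k ≤ 0: the loop never starts, the scan stops at once; both return (0, start)
    have hA : rideMax start k people n = (0, start) := by
      unfold rideMax
      rw [loop_succ, if_neg (by omega)]
    rw [hA]
    cases hrot : PySem.List.slice people (some start) none ++ PySem.List.slice people none (some start) with
    | nil => rfl
    | cons x rest =>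
      rw [scanB, if_pos (Or.inl (by omega))]
      simp
  · -- the first group alone exceeds k: both stop before boarding anyone
    obtain ⟨x, rest, hx, hrot⟩ := head_rot people start hrange
    have hxval : k < x := by
      have : PySem.List.pyGetD people start 0 = x := by
        simp [PySem.List.pyGetD, hx]
      omega
    have hA : rideMax start k people n = (0, start) := by
      unfold rideMax
      rw [loop_succ, if_pos hk]
      simp only [hx]
      rw [if_neg (by omega), loop_over]
    rw [hA, hrot, scanB, if_pos (Or.inr (by omega))]
    simp
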